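-- pv_equiv track=rewrite | github.com/yongchao98/AutoTAMP | openai_func.py | abbreviate_list_state_check
-- ===== SOURCE A (Python) =====
-- def abbreviate_list_state_check(lst):
--   result = []
--   temp_group = []
--
--   for i in range(len(lst)):
--     if temp_group and (lst[i][:2] != temp_group[0][:2]):
--       # Append the first and last element of the temp_group to the result list, if they're different
--       if temp_group[0] != temp_group[-1]:
--         result.append(temp_group[0])
--         result.append(temp_group[-1])
--       else:
--         result.append(temp_group[0])
--       # Clear the temp_group
--       temp_group = []
--     # Append the current element to the temp_group
--     temp_group.append(lst[i])
--
--   # Append the first and last element of the last group, if they're different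
--   if temp_group:
--     if temp_group[0] != temp_group[-1]:
--       result.append(temp_group[0])
--       result.append(temp_group[-1])
--     else:
--       result.append(temp_group[0])
--
--   return result
-- ===== SOURCE B (Python) =====
-- def abbreviate_list_state_check(lst):
--   n = len(lst)
--   # phase 1: indices where a new 2-char-prefix run starts
--   starts = [i for i in range(n) if i == 0 or lst[i][:2] != lst[i-1][:2]]
--   # phase 2: each run spans [s, e); emit its first element, and its last if different
--   out = []
--   for s, e in zip(starts, starts[1:] + [n]):
--     first = lst[s]
--     last = lst[e-1]
--     out.append(first)
--     if last != first:
--       out.append(last)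
--   return out
-- ===== Notes on version B (the rewrite author's own statement) =====
-- stated objective: alternative
-- what changed: Replaces the streaming buffer with a two-phase index computation: first collect the boundary indices where the 2-char prefix changes, then emit lst[s] (and lst[e-1] if different) for each run interval [s,e) derived by zipping consecutive boundaries.
import Mathlib
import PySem

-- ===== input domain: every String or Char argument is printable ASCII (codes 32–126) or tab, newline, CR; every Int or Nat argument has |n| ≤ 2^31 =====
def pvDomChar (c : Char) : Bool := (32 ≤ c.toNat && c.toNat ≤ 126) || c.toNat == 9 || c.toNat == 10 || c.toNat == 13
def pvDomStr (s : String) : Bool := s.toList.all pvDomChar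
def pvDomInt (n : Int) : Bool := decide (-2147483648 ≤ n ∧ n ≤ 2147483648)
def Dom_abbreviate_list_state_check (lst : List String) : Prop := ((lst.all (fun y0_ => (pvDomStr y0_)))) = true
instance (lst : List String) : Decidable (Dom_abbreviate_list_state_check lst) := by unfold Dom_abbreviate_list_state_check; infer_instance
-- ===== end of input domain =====

-- B computes the same output in two staged passes over indices (boundary indices, then per-interval emission)
-- instead of A's single streaming pass with a buffer; behaviour proved equal ("alternative", not faster).
-- ===== PORT A =====
-- A's flush of temp_group (the two nested append branches), on a nonempty buffer h :: t
def pvFlushA (h : String) (t : List String) : List String :=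
  if h ≠ (h :: t).getLast (by simp) then [h, (h :: t).getLast (by simp)] else [h]

-- the for-loop over lst, carrying (result, temp_group) exactly as A does
def pvLoopA (result : List String) (temp_group : List String) : List String → List String
  | [] =>
    match temp_group with
    | [] => result
    | h :: t => result ++ pvFlushA h t
  | x :: xs =>
    match temp_group with
    | [] => pvLoopA result [x] xs
    | h :: t =>
      if PySem.Str.slice x none (some 2) ≠ PySem.Str.slice h none (some 2) then
        pvLoopA (result ++ pvFlushA h t) [x] xs
      else
        pvLoopA result (h :: t ++ [x]) xs

def abbreviate_list_state_check (lst : List String) : List String :=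
  pvLoopA [] [] lst

-- ===== PORT B =====
-- two phases: boundary indices 'starts' (a comprehension over range(n)), then emission per
-- interval (s, e) from zip(starts, starts[1:] + [n]); all indices Source B computes are in range,
-- so lst[i] is ported as getD with a default that is never used
def abbreviate_list_state_check_alt (lst : List String) : List String :=
  let n := lst.length
  let starts := (List.range n).filter (fun i =>
    i == 0 || decide (PySem.Str.slice (lst.getD i "") none (some 2) ≠ PySem.Str.slice (lst.getD (i - 1) "") none (some 2)))
  (starts.zip (starts.tail ++ [n])).foldl
    (fun out se =>
      let first := lst.getD se.1 ""
      let last := lst.getD (se.2 - 1) ""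
      (out ++ [first]) ++ (if last ≠ first then [last] else [])) []

-- ===== PRECONDITION & SPEC =====
def Spec_abbreviate_list_state_check (lst : List String) (out : List String) : Prop := out = abbreviate_list_state_check_alt lst
instance (lst : List String) (out : List String) : Decidable (Spec_abbreviate_list_state_check lst out) := by unfold Spec_abbreviate_list_state_check; infer_instance

-- ===== CLAIM (what is proved, stated in full; the proofs are below) =====
def Claim_equal_abbreviate_list_state_check : Prop := ∀ (lst : List String), Dom_abbreviate_list_state_check lst → Spec_abbreviate_list_state_check lst (abbreviate_list_state_check lst)

-- ===== LEMMAS AND PROOFS =====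
-- key of a string, proof-side abbreviation
def pvKey (s : String) : String := PySem.Str.slice s none (some 2)

-- reference emission for one nonempty group
def pvEmitB (h : String) (t : List String) : List String :=
  if h ≠ (h :: t).getLast (by simp) then [h, (h :: t).getLast (by simp)] else [h]

-- reference: consecutive grouping by pvKey (proof intermediary between the two ports)
def pvGroupsB : List String → List String
  | [] => []
  | x :: xs =>
    pvEmitB x (xs.takeWhile (fun y => PySem.Str.slice y none (some 2) = PySem.Str.slice x none (some 2))) ++
      pvGroupsB (xs.dropWhile (fun y => PySem.Str.slice y none (some 2) = PySem.Str.slice x none (some 2)))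
termination_by l => l.length
decreasing_by
  simp
  exact List.length_dropWhile_le _ _

theorem pv_takeWhile_append {p : String → Bool} {t : List String} (ht : ∀ y ∈ t, p y = true)
    (rest : List String) : (t ++ rest).takeWhile p = t ++ rest.takeWhile p := by
  induction t with
  | nil => simp
  | cons a t ih =>
    simp only [List.cons_append, List.takeWhile_cons, ht a (by simp), if_true]
    rw [ih (fun y hy => ht y (by simp [hy]))]

theorem pv_dropWhile_append {p : String → Bool} {t : List String} (ht : ∀ y ∈ t, p y = true)
    (rest : List String) : (t ++ rest).dropWhile p = rest.dropWhile p := by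
  induction t with
  | nil => simp
  | cons a t ih =>
    simp only [List.cons_append, List.dropWhile_cons, ht a (by simp)]
    exact ih (fun y hy => ht y (by simp [hy]))

theorem pvLoop_eq (l : List String) : ∀ (res : List String) (h : String) (t : List String),
    (∀ y ∈ t, pvKey y = pvKey h) →
    pvLoopA res (h :: t) l = res ++ pvGroupsB (h :: t ++ l) := by
  induction l with
  | nil =>
    intro res h t ht
    have h1 : (t ++ ([] : List String)).takeWhile
        (fun y => decide (PySem.Str.slice y none (some 2) = PySem.Str.slice h none (some 2))) = t := by
      rw [pv_takeWhile_append (fun y hy => by simpa [pvKey] using ht y hy)]; simp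
    have h2 : (t ++ ([] : List String)).dropWhile
        (fun y => decide (PySem.Str.slice y none (some 2) = PySem.Str.slice h none (some 2))) = [] := by
      rw [pv_dropWhile_append (fun y hy => by simpa [pvKey] using ht y hy)]; simp
    simp only [pvLoopA, pvGroupsB, List.append_nil] at *
    rw [h1, h2]
    simp [pvGroupsB, pvFlushA, pvEmitB]
  | cons x xs ih =>
    intro res h t ht
    by_cases hk : PySem.Str.slice x none (some 2) = PySem.Str.slice h none (some 2)
    · have : pvLoopA res (h :: t) (x :: xs) = pvLoopA res (h :: (t ++ [x])) xs := by
        simp [pvLoopA, hk]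
      rw [this, ih res h (t ++ [x])
          (by intro y hy; rcases List.mem_append.1 hy with hy | hy
              · exact ht y hy
              · simp at hy; simp [hy, pvKey, hk])]
      simp
    · have hstep : pvLoopA res (h :: t) (x :: xs) = pvLoopA (res ++ pvFlushA h t) [x] xs := by
        simp [pvLoopA, hk]
      rw [hstep, ih (res ++ pvFlushA h t) x [] (by simp)]
      have h1 : (t ++ x :: xs).takeWhile
          (fun y => decide (PySem.Str.slice y none (some 2) = PySem.Str.slice h none (some 2))) = t := by
        rw [pv_takeWhile_append (fun y hy => by simpa [pvKey] using ht y hy)]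
        simp [hk]
      have h2 : (t ++ x :: xs).dropWhile
          (fun y => decide (PySem.Str.slice y none (some 2) = PySem.Str.slice h none (some 2))) = x :: xs := by
        rw [pv_dropWhile_append (fun y hy => by simpa [pvKey] using ht y hy)]
        simp [hk]
      conv_rhs => rw [show h :: t ++ x :: xs = h :: (t ++ x :: xs) by simp, pvGroupsB]
      rw [h1, h2]
      simp [pvFlushA, pvEmitB]

theorem pvA_eq_groups (lst : List String) : abbreviate_list_state_check lst = pvGroupsB lst := by
  unfold abbreviate_list_state_check
  cases lst with
  | nil => simp [pvLoopA, pvGroupsB]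
  | cons h t =>
    show pvLoopA [] [h] t = _
    simpa using pvLoop_eq t [] h [] (by simp)

-- ---- B side: boundary indices characterised recursively ----
def pvSAux (prev : String) : List String → List Nat
  | [] => []
  | x :: xs => (if pvKey x ≠ pvKey prev then [0] else []) ++ (pvSAux x xs).map (· + 1)

def pvStartsRec : List String → List Nat
  | [] => []
  | h :: t => 0 :: (pvSAux h t).map (· + 1)

def pvStep (h : String) (t : List String) : List Nat :=
  (List.range t.length).filter (fun i => decide (pvKey (t.getD i "") ≠ pvKey ((h :: t).getD i "")))

def pvStartsOf (lst : List String) : List Nat :=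
  (List.range lst.length).filter (fun i =>
    i == 0 || decide (PySem.Str.slice (lst.getD i "") none (some 2) ≠ PySem.Str.slice (lst.getD (i - 1) "") none (some 2)))

theorem pvStep_cons (h x : String) (xs : List String) :
    pvStep h (x :: xs) = (if pvKey x ≠ pvKey h then [0] else []) ++ (pvStep x xs).map (· + 1) := by
  unfold pvStep
  rw [List.length_cons, List.range_succ_eq_map, List.filter_cons]
  simp only [List.getD_cons_zero]
  rw [List.filter_map]
  by_cases hk : pvKey x = pvKey h <;> (simp [hk, Function.comp_def]; rfl)

theorem pvStep_eq_sAux (t : List String) : ∀ h, pvStep h t = pvSAux h t := by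
  induction t with
  | nil => intro h; simp [pvStep, pvSAux]
  | cons x xs ih => intro h; rw [pvStep_cons, pvSAux, ih]

theorem pvStartsOf_eq_rec (lst : List String) : pvStartsOf lst = pvStartsRec lst := by
  cases lst with
  | nil => simp [pvStartsOf, pvStartsRec]
  | cons h t =>
    unfold pvStartsOf pvStartsRec
    rw [List.length_cons, List.range_succ_eq_map, List.filter_cons]
    simp only [beq_self_eq_true, Bool.true_or, if_true]
    rw [List.filter_map, ← pvStep_eq_sAux]
    unfold pvStep
    congr 1

-- emission of one interval (s, e)
def pvEmitOne (lst : List String) (se : Nat × Nat) : List String :=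
  (lst.getD se.1 "") :: (if lst.getD (se.2 - 1) "" ≠ lst.getD se.1 "" then [lst.getD (se.2 - 1) ""] else [])

theorem pvSAux_shift (tw : List String) : ∀ (prev : String) (h : String) (rest : List String),
    pvKey prev = pvKey h → (∀ y ∈ tw, pvKey y = pvKey h) →
    (∀ r rs, rest = r :: rs → pvKey r ≠ pvKey h) →
    pvSAux prev (tw ++ rest) = (pvStartsRec rest).map (· + tw.length) := by
  induction tw with
  | nil =>
    intro prev h rest hp _ hr
    cases rest with
    | nil => simp [pvSAux, pvStartsRec]
    | cons r rs =>
      have : pvKey r ≠ pvKey prev := by rw [hp]; exact hr r rs rfl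
      simp [pvSAux, pvStartsRec, this]
  | cons y tw' ih =>
    intro prev h rest hp hy hr
    have hyk : pvKey y = pvKey h := hy y (by simp)
    have hne : ¬ pvKey y ≠ pvKey prev := by simp [hyk, hp]
    rw [List.cons_append]
    show (if pvKey y ≠ pvKey prev then [0] else []) ++ (pvSAux y (tw' ++ rest)).map (· + 1) = _
    rw [if_neg hne, List.nil_append, ih y h rest hyk (fun z hz => hy z (by simp [hz])) hr,
      List.map_map]
    exact List.map_congr_left (fun a _ => by simp only [Function.comp_apply, List.length_cons]; omega)

theorem pv_getD_last (tw : List String) : ∀ h : String, (h :: tw).getD tw.length "" = (h :: tw).getLast (by simp) := by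
  induction tw with
  | nil => intro h; rfl
  | cons y ys ih =>
    intro h
    have h1 : (h :: y :: ys).getD (y :: ys).length "" = (y :: ys).getD ys.length "" := rfl
    rw [h1, ih y, List.getLast_cons (by simp : (y :: ys) ≠ [])]

theorem pv_emit_shift (lst rest : List String) (k : Nat)
    (hget : ∀ i : Nat, lst.getD (i + (k + 1)) "" = rest.getD i "") :
    ∀ ps : List (Nat × Nat), (∀ p ∈ ps, 1 ≤ p.2) →
    (ps.map (Prod.map (· + (k+1)) (· + (k+1)))).flatMap (pvEmitOne lst) = ps.flatMap (pvEmitOne rest) := by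
  intro ps hps
  induction ps with
  | nil => simp
  | cons p ps ih =>
    have h2 : 1 ≤ p.2 := hps p (by simp)
    simp only [List.map_cons, List.flatMap_cons, ih (fun q hq => hps q (by simp [hq]))]
    congr 1
    unfold pvEmitOne
    have e1 : (Prod.map (· + (k+1)) (· + (k+1)) p).1 = p.1 + (k+1) := rfl
    have e2 : (Prod.map (· + (k+1)) (· + (k+1)) p).2 = p.2 + (k+1) := rfl
    rw [e1, e2, hget p.1, show p.2 + (k+1) - 1 = (p.2 - 1) + (k+1) by omega, hget (p.2 - 1)]

theorem pv_dropWhile_head {p : String → Bool} : ∀ (l : List String) (r : String) (rs : List String),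
    l.dropWhile p = r :: rs → p r = false := by
  intro l
  induction l with
  | nil => intro r rs h; simp at h
  | cons x xs ih =>
    intro r rs h
    rw [List.dropWhile_cons] at h
    by_cases hx : p x
    · rw [if_pos hx] at h; exact ih r rs h
    · rw [if_neg hx] at h; cases h; simpa using hx

theorem pvMain : ∀ (n : Nat) (lst : List String), lst.length ≤ n →
    ((pvStartsRec lst).zip ((pvStartsRec lst).tail ++ [lst.length])).flatMap (pvEmitOne lst) = pvGroupsB lst := by
  intro n
  induction n with
  | zero =>
    intro lst hl
    have hnil : lst = [] := by cases lst with | nil => rfl | cons a b => simp at hl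
    subst hnil; simp [pvStartsRec, pvGroupsB]
  | succ n ih =>
    intro lst hl
    cases lst with
    | nil => simp [pvStartsRec, pvGroupsB]
    | cons h t =>
      set p : String → Bool := fun y => decide (PySem.Str.slice y none (some 2) = PySem.Str.slice h none (some 2)) with hp
      set tw := t.takeWhile p with htw
      set rest := t.dropWhile p with hrest
      have hsplit : t = tw ++ rest := (List.takeWhile_append_dropWhile).symm
      have htwk : ∀ y ∈ tw, pvKey y = pvKey h := by
        intro y hy
        have := List.mem_takeWhile_imp (l := t) (p := p) hy
        simpa [hp, pvKey] using this
      have hrk : ∀ r rs, rest = r :: rs → pvKey r ≠ pvKey h := by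
        intro r rs hr
        have := pv_dropWhile_head (p := p) t r rs (by rw [← hrest, hr])
        simpa [hp, pvKey] using this
      set k := tw.length with hk
      have hS : pvStartsRec (h :: t) = 0 :: (pvStartsRec rest).map (· + (k + 1)) := by
        rw [pvStartsRec]
        congr 1
        conv_lhs => rw [hsplit]
        rw [pvSAux_shift tw h h rest rfl htwk hrk, List.map_map]
        exact List.map_congr_left (fun a _ => by simp only [Function.comp_apply]; omega)
      have hlen : (h :: t).length = k + 1 + rest.length := by
        simp only [List.length_cons, hsplit, List.length_append, hk]; omega
      have hgroups : pvGroupsB (h :: t) = pvEmitB h tw ++ pvGroupsB rest := by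
        rw [pvGroupsB]
      have hgetlast : (h :: t).getD k "" = (h :: tw).getLast (by simp) := by
        rw [hsplit, show (h :: (tw ++ rest)) = (h :: tw) ++ rest from rfl,
          List.getD_eq_getElem?_getD, List.getElem?_append_left (by simp [hk]),
          ← List.getD_eq_getElem?_getD, hk, pv_getD_last]
      have hfirstemit : pvEmitOne (h :: t) (0, k + 1) = pvEmitB h tw := by
        unfold pvEmitOne pvEmitB
        simp only [List.getD_cons_zero, Nat.add_sub_cancel]
        rw [hgetlast]
        by_cases hd : (h :: tw).getLast (by simp) = h
        · simp [hd]
        · simp [hd, Ne.symm hd]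
      have hget : ∀ i : Nat, (h :: t).getD (i + (k + 1)) "" = rest.getD i "" := by
        intro i
        rw [hsplit, show (h :: (tw ++ rest)) = (h :: tw) ++ rest from rfl]
        rw [List.getD_eq_getElem?_getD, List.getElem?_append_right (by simp only [List.length_cons]; omega),
          ← List.getD_eq_getElem?_getD]
        congr 1
        simp only [List.length_cons]
        omega
      cases hrc : rest with
      | nil =>
        rw [hrc] at hlen hgroups
        rw [hS, hrc]
        simp only [pvStartsRec, List.map_nil, List.tail_cons, List.nil_append, List.length_nil] at *
        rw [hlen]
        simp only [List.zip_cons_cons, List.zip_nil_left, List.flatMap_cons, List.flatMap_nil,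
          List.append_nil]
        rw [show k + 1 + 0 = k + 1 by omega, hfirstemit, hgroups]
        simp [pvGroupsB]
      | cons r rs =>
        rw [hrc] at hlen hgroups hget
        have hN : (h :: t).length = (r :: rs).length + (k + 1) := by rw [hlen]; omega
        have hScons : pvStartsRec (r :: rs) = 0 :: (pvSAux r rs).map (· + 1) := rfl
        have hzip : ((0 :: (pvStartsRec (r :: rs)).map (· + (k+1))).zip
              ((0 :: (pvStartsRec (r :: rs)).map (· + (k+1))).tail ++ [(h :: t).length]))
            = (0, k + 1) :: (((pvStartsRec (r :: rs)).zip ((pvStartsRec (r :: rs)).tail ++ [(r :: rs).length])).map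
                (Prod.map (· + (k+1)) (· + (k+1)))) := by
          conv_lhs => rw [hScons]
          rw [List.tail_cons, List.map_cons, List.cons_append, List.zip_cons_cons]
          congr 1
          · norm_num
          · rw [hN, show ((pvSAux r rs).map (· + 1)).map (· + (k+1)) ++ [(r :: rs).length + (k+1)]
                = ((((pvSAux r rs).map (· + 1)) ++ [(r :: rs).length]).map (· + (k+1))) by simp,
              show ((0 : Nat) + (k+1)) :: ((pvSAux r rs).map (· + 1)).map (· + (k+1))
                = ((0 :: (pvSAux r rs).map (· + 1)).map (· + (k+1))) by simp,
              List.zip_map, hScons, List.tail_cons]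
        have hends : ∀ q ∈ (pvStartsRec (r :: rs)).zip ((pvStartsRec (r :: rs)).tail ++ [(r :: rs).length]), 1 ≤ q.2 := by
          intro q hq
          have := (List.of_mem_zip hq).2
          rw [hScons] at this
          simp at this
          rcases this with ⟨a, _, ha⟩ | hlen'
          · omega
          · simp [hlen']
        have hrlen : (r :: rs).length ≤ n := by
          simp only [List.length_cons] at hl hlen ⊢
          omega
        rw [hS, hrc, hzip, List.flatMap_cons, hfirstemit,
          pv_emit_shift (h :: t) (r :: rs) k hget _ hends, ih (r :: rs) hrlen, hgroups]

theorem pv_fold (lst : List String) : ∀ (ps : List (Nat × Nat)) (acc : List String),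
    ps.foldl (fun out se =>
      (out ++ [lst.getD se.1 ""]) ++ (if lst.getD (se.2 - 1) "" ≠ lst.getD se.1 "" then [lst.getD (se.2 - 1) ""] else [])) acc
    = acc ++ ps.flatMap (pvEmitOne lst) := by
  intro ps
  induction ps with
  | nil => intro acc; simp
  | cons q qs ih =>
    intro acc
    rw [List.foldl_cons, ih]
    simp [pvEmitOne, List.append_assoc]

theorem pvAlt_eq_groups (lst : List String) : abbreviate_list_state_check_alt lst = pvGroupsB lst := by
  have h0 : abbreviate_list_state_check_alt lst
      = ((pvStartsOf lst).zip ((pvStartsOf lst).tail ++ [lst.length])).foldl (fun out se =>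
          (out ++ [lst.getD se.1 ""]) ++
            (if lst.getD (se.2 - 1) "" ≠ lst.getD se.1 "" then [lst.getD (se.2 - 1) ""] else [])) [] := rfl
  rw [h0, pv_fold, List.nil_append, pvStartsOf_eq_rec, pvMain lst.length lst le_rfl]

-- ===== VERDICT (by name: the statement is the Claim_ definition above) =====
theorem abbreviate_list_state_check_spec : Claim_equal_abbreviate_list_state_check := by
  intro lst _
  unfold Spec_abbreviate_list_state_check
  rw [pvA_eq_groups, pvAlt_eq_groups]
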